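-- pv_equiv track=rewrite | github.com/hojjang98/SK-Shieldus-rookies-28 | projects/week_10/scanner/scanners/os_scan/39_tftp_talk_services.py | _xinetd_enabled
-- ===== SOURCE A (Python) =====
-- def _xinetd_enabled(content):
--     has_disable = False
--     for line in content.splitlines():
--         line = line.strip()
--         if not line or line.startswith('#'):
--             continue
--         if line.startswith("disable"):
--             has_disable = True
--             if "no" in line:
--                 return True
--     return not has_disable
-- ===== SOURCE B (Python) =====
-- def _xinetd_enabled(content):
--     lines = content.splitlines()
--     n = len(lines)
--     # phase 1: advance to the first 'disable' directive (comments/blank lines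
--     # cannot start with 'disable' after strip, so no explicit skip is needed)
--     i = 0
--     while i < n and not lines[i].strip().startswith("disable"):
--         i += 1
--     if i == n:
--         return True  # no disable directive at all: service enabled by default
--     # phase 2: does any disable directive from here on say 'no'?
--     while i < n:
--         s = lines[i].strip()
--         if s.startswith("disable") and "no" in s:
--             return True
--         i += 1
--     return False
-- ===== Notes on version B (the rewrite author's own statement) =====
-- stated objective: alternative
-- what changed: Replaced the flag-plus-early-return loop by a two-phase index-driven state machine: a first while loop only locates the first 'disable' directive (answering True if none exists), and a second while loop over the remaining suffix searches for a disable directive containing 'no'; the has_disable flag and the comment/blank skip disappear.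
import Mathlib
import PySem

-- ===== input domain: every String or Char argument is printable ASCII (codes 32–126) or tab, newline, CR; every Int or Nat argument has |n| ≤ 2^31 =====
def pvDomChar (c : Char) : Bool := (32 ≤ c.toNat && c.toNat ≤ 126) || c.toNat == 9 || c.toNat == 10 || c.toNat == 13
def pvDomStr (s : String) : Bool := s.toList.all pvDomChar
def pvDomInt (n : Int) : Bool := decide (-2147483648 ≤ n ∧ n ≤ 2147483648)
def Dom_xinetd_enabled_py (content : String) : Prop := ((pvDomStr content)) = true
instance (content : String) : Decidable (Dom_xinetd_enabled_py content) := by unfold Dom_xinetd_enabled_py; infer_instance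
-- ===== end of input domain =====

-- B replaces A's has_disable flag and early-return loop by a two-phase state
-- machine: locate the first 'disable' directive, then search the suffix for
-- one containing 'no' (alternative decomposition, same cost).

-- ===== PORT A =====
-- the for-loop over content.splitlines() with the has_disable flag and early return
def xinetdLoopA : List String → Bool → Bool
  | [], hasDisable => !hasDisable
  | raw :: rest, hasDisable =>
    let line := PySem.Str.strip raw
    if line = "" || PySem.Str.startswith line "#" then
      xinetdLoopA rest hasDisable
    else if PySem.Str.startswith line "disable" then
      if PySem.Str.isIn "no" line then true
      else xinetdLoopA rest true
    else
      xinetdLoopA rest hasDisable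

def xinetd_enabled_py (content : String) : Bool :=
  xinetdLoopA (PySem.Str.splitlines content) false

-- ===== PORT B =====
-- phase 1: 'while i < n and not lines[i].strip().startswith("disable"): i += 1';
-- returns the suffix lines[i:] (none when i == n)
def xinetdPhase1 : List String → Option (List String)
  | [] => none
  | l :: rest =>
    if PySem.Str.startswith (PySem.Str.strip l) "disable" then some (l :: rest)
    else xinetdPhase1 rest

-- phase 2: 'while i < n: …' over the remaining suffix
def xinetdPhase2 : List String → Bool
  | [] => false
  | l :: rest =>
    let s := PySem.Str.strip l
    if PySem.Str.startswith s "disable" && PySem.Str.isIn "no" s then true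
    else xinetdPhase2 rest

def xinetd_enabled_py_alt (content : String) : Bool :=
  match xinetdPhase1 (PySem.Str.splitlines content) with
  | none => true
  | some suffix => xinetdPhase2 suffix

-- ===== PRECONDITION & SPEC =====
def Spec_xinetd_enabled_py (content : String) (out : Bool) : Prop := out = xinetd_enabled_py_alt content
instance (content : String) (out : Bool) : Decidable (Spec_xinetd_enabled_py content out) := by unfold Spec_xinetd_enabled_py; infer_instance

-- ===== CLAIM (what is proved, stated in full; the proofs are below) =====
def Claim_equal_xinetd_enabled_py : Prop := ∀ (content : String), Dom_xinetd_enabled_py content → Spec_xinetd_enabled_py content (xinetd_enabled_py content)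

-- ===== LEMMAS AND PROOFS =====

-- a line starting with '#' cannot start with "disable" (Chars level)
theorem chars_hash_not_disable (cs : List Char)
    (h : PySem.Chars.startswith cs ['#'] = true) :
    PySem.Chars.startswith cs ['d', 'i', 's', 'a', 'b', 'l', 'e'] = false := by
  rw [PySem.Chars.startswith_iff] at h
  by_contra hc
  rw [Bool.not_eq_false, PySem.Chars.startswith_iff] at hc
  obtain ⟨t1, h1⟩ := h
  obtain ⟨t2, h2⟩ := hc
  rw [← h2] at h1
  simp at h1

-- the empty line cannot start with "disable"
theorem chars_empty_not_disable :
    PySem.Chars.startswith ([] : List Char) ['d', 'i', 's', 'a', 'b', 'l', 'e'] = false := by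
  decide

-- A's loop with the flag already set is exactly B's phase 2
theorem loopA_true_eq_phase2 (lines : List String) :
    xinetdLoopA lines true = xinetdPhase2 lines := by
  induction lines with
  | nil => simp [xinetdLoopA, xinetdPhase2]
  | cons raw rest ih =>
    simp only [xinetdLoopA, xinetdPhase2]
    by_cases hempty : PySem.Str.strip raw = ""
    · have h0 : PySem.Chars.strip raw.toList = [] := by
        have := congrArg String.toList hempty
        simpa [PySem.Str.strip] using this
      simp [h0, chars_empty_not_disable, ih]
    · by_cases hhash : PySem.Chars.startswith (PySem.Chars.strip raw.toList) ['#'] = true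
      · simp [hempty, PySem.Str.startswith, hhash, chars_hash_not_disable _ hhash, ih]
      · by_cases hdis : PySem.Chars.startswith (PySem.Chars.strip raw.toList)
            ['d', 'i', 's', 'a', 'b', 'l', 'e'] = true
        · by_cases hno : PySem.Chars.isIn ['n', 'o'] (PySem.Chars.strip raw.toList) = true
          · simp [hempty, hhash, hdis, hno, PySem.Str.startswith, PySem.Str.isIn]
          · simp [hempty, hhash, hdis, hno, PySem.Str.startswith, PySem.Str.isIn, ih]
        · simp [hempty, hhash, hdis, PySem.Str.startswith, ih]

-- A's loop with the flag clear is phase 1 followed by phase 2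
theorem loopA_false_eq_phases (lines : List String) :
    xinetdLoopA lines false
      = (match xinetdPhase1 lines with
         | none => true
         | some suffix => xinetdPhase2 suffix) := by
  induction lines with
  | nil => simp [xinetdLoopA, xinetdPhase1]
  | cons raw rest ih =>
    simp only [xinetdLoopA, xinetdPhase1]
    by_cases hempty : PySem.Str.strip raw = ""
    · have h0 : PySem.Chars.strip raw.toList = [] := by
        have := congrArg String.toList hempty
        simpa [PySem.Str.strip] using this
      simp [h0, chars_empty_not_disable, ih]
    · by_cases hhash : PySem.Chars.startswith (PySem.Chars.strip raw.toList) ['#'] = true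
      · simp [hempty, PySem.Str.startswith, hhash, chars_hash_not_disable _ hhash, ih]
      · by_cases hdis : PySem.Chars.startswith (PySem.Chars.strip raw.toList)
            ['d', 'i', 's', 'a', 'b', 'l', 'e'] = true
        · by_cases hno : PySem.Chars.isIn ['n', 'o'] (PySem.Chars.strip raw.toList) = true
          · simp [hempty, hhash, hdis, hno, PySem.Str.startswith, PySem.Str.isIn,
              xinetdPhase2]
          · simp [hempty, hhash, hdis, hno, PySem.Str.startswith, PySem.Str.isIn,
              xinetdPhase2, loopA_true_eq_phase2]
        · simp [hempty, hhash, hdis, PySem.Str.startswith, ih]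

-- ===== VERDICT (by name: the statement is the Claim_ definition above) =====
theorem xinetd_enabled_py_spec : Claim_equal_xinetd_enabled_py := by
  intro content _
  unfold Spec_xinetd_enabled_py xinetd_enabled_py xinetd_enabled_py_alt
  exact loopA_false_eq_phases _
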